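-- pv_equiv track=rewrite | github.com/mspremulli/yconic-compute | src/swarm/agent/strategies/tree_of_thought.py | _parse_branches
-- ===== SOURCE A (Python) =====
-- def _parse_branches(response: str) -> list[dict]:
--     branches = []
--     current = {"name": "Initial", "reasoning": "", "final": ""}
--     in_final = False
--
--     for line in response.split("\n"):
--         stripped = line.strip().lower()
--         if any(k in stripped for k in ["final", "best", "conclusion"]):
--             in_final = True
--         if stripped.startswith(("branch", "path", "approach", "option")):
--             if current["reasoning"]:
--                 branches.append(current)
--             current = {"name": stripped, "reasoning": "", "final": ""}
--             in_final = False
--         elif in_final: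
--             current["final"] += line + "\n"
--         else:
--             current["reasoning"] += line + "\n"
--
--     if current["reasoning"]:
--         branches.append(current)
--
--     return branches if branches else [{"name": "Default", "reasoning": response, "final": response}]
-- ===== SOURCE B (Python) =====
-- def _parse_branches(response: str) -> list[dict]:
--     # Two-pass: cut lines into header-delimited segments, then split each
--     # segment at its first "final/best/conclusion" line.
--     headers = ("branch", "path", "approach", "option")
--     triggers = ("final", "best", "conclusion")
--
--     segments = []
--     name, body = "Initial", []
--     for line in response.split("\n"):
--         s = line.strip().lower()
--         if s.startswith(headers):
--             segments.append((name, body))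
--             name, body = s, []
--         else:
--             body.append(line)
--     segments.append((name, body))
--
--     branches = []
--     for name, body in segments:
--         cut = len(body)
--         for i, line in enumerate(body):
--             if any(t in line.strip().lower() for t in triggers):
--                 cut = i
--                 break
--         if cut > 0:
--             branches.append({
--                 "name": name,
--                 "reasoning": "".join(l + "\n" for l in body[:cut]),
--                 "final": "".join(l + "\n" for l in body[cut:]),
--             })
--     return branches or [{"name": "Default", "reasoning": response, "final": response}]
-- ===== Notes on version B (the rewrite author's own statement) =====
-- stated objective: alternative
-- what changed: Replaces A's single pass with mutable current-dict and in_final flag by a two-pass decomposition: first cut the lines into header-delimited segments, then split each segment at its first final/best/conclusion line and keep it iff anything precedes that split.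
import Mathlib
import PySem

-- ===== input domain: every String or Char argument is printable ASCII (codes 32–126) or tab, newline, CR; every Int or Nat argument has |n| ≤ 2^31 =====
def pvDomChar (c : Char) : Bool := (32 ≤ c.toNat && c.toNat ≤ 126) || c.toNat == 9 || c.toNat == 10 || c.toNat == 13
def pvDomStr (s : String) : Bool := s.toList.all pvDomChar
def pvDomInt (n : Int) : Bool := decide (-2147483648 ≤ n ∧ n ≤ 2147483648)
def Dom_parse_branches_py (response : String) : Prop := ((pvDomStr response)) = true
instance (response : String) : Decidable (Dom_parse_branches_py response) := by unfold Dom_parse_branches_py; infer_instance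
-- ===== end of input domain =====

-- B replaces A's one-pass mutable-state loop by a two-pass decomposition (segment at
-- header lines, then split each segment at its first trigger line); objective: alternative.

-- ===== PORT A =====

-- shared Python literals
def pvTriggers : List (List Char) := ["final".toList, "best".toList, "conclusion".toList]
def pvHeaders : List (List Char) := ["branch".toList, "path".toList, "approach".toList, "option".toList]

-- any(k in stripped for k in ["final","best","conclusion"])
def pvIsTrigger (s : List Char) : Bool := pvTriggers.any (fun k => PySem.Chars.isIn k s)
-- stripped.startswith(("branch","path","approach","option"))  (tuple = any prefix)
def pvIsHeader (s : List Char) : Bool := pvHeaders.any (fun k => PySem.Chars.startswith s k)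

-- the dict {"name": n, "reasoning": r, "final": f}
def pvMkBranch (n r f : List Char) : List (String × String) :=
  [("name", String.ofList n), ("reasoning", String.ofList r), ("final", String.ofList f)]

-- A's for-loop over the lines, state = (branches, current name/reasoning/final, in_final);
-- the [] case performs A's closing "if current['reasoning']: branches.append(current)".
def pvLoopA : List (List Char) → List (List (String × String)) → List Char → List Char →
    List Char → Bool → List (List (String × String))
  | [], bs, n, r, f, _ => if r = [] then bs else bs ++ [pvMkBranch n r f]
  | line :: rest, bs, n, r, f, inF =>
    let stripped := PySem.Chars.lower (PySem.Chars.strip line)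
    let inF := if pvIsTrigger stripped then true else inF
    if pvIsHeader stripped then
      pvLoopA rest (if r = [] then bs else bs ++ [pvMkBranch n r f]) stripped [] [] false
    else if inF then
      pvLoopA rest bs n r (f ++ line ++ ['\n']) inF
    else
      pvLoopA rest bs n (r ++ line ++ ['\n']) f inF

def parse_branches_py (response : String) : List (List (String × String)) :=
  let bs := pvLoopA (PySem.Chars.splitOn response.toList "\n".toList) [] "Initial".toList [] [] false
  if bs = [] then [[("name", "Default"), ("reasoning", response), ("final", response)]] else bs

-- ===== PORT B =====

-- first pass: cut the lines into segments at header lines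
def pvSegB : List (List Char) → List Char → List (List Char) → List (List Char × List (List Char))
  | [], name, acc => [(name, acc)]
  | line :: rest, name, acc =>
    let s := PySem.Chars.lower (PySem.Chars.strip line)
    if pvIsHeader s then (name, acc) :: pvSegB rest s []
    else pvSegB rest name (acc ++ [line])

-- the for/break loop computing `cut`: index of the first trigger line (length if none)
def pvCutIdx : List (List Char) → Nat
  | [] => 0
  | line :: rest =>
    if pvIsTrigger (PySem.Chars.lower (PySem.Chars.strip line)) then 0 else pvCutIdx rest + 1

-- "".join(l + "\n" for l in body)
def pvJoinNL (body : List (List Char)) : List Char := (body.map (· ++ ['\n'])).flatten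

-- second pass, one segment: keep it iff cut > 0
def pvProcSeg (seg : List Char × List (List Char)) : Option (List (String × String)) :=
  let cut := pvCutIdx seg.2
  if 0 < cut then some (pvMkBranch seg.1 (pvJoinNL (seg.2.take cut)) (pvJoinNL (seg.2.drop cut)))
  else none

def parse_branches_py_alt (response : String) : List (List (String × String)) :=
  let segs := pvSegB (PySem.Chars.splitOn response.toList "\n".toList) "Initial".toList []
  let bs := segs.filterMap pvProcSeg
  if bs = [] then [[("name", "Default"), ("reasoning", response), ("final", response)]] else bs

-- ===== PRECONDITION & SPEC =====
def Spec_parse_branches_py (response : String) (out : List (List (String × String))) : Prop := out = parse_branches_py_alt response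
instance (response : String) (out : List (List (String × String))) : Decidable (Spec_parse_branches_py response out) := by unfold Spec_parse_branches_py; infer_instance

-- ===== CLAIM (what is proved, stated in full; the proofs are below) =====
def Claim_equal_parse_branches_py : Prop := ∀ (response : String), Dom_parse_branches_py response → Spec_parse_branches_py response (parse_branches_py response)

-- ===== LEMMAS AND PROOFS =====

theorem pvCutIdx_le (body : List (List Char)) : pvCutIdx body ≤ body.length := by
  induction body with
  | nil => simp [pvCutIdx]
  | cons l rest ih => simp only [pvCutIdx, List.length_cons]; split <;> omega

theorem pvCutIdx_append_singleton (body : List (List Char)) (line : List Char) :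
    pvCutIdx (body ++ [line]) =
      if pvCutIdx body < body.length then pvCutIdx body
      else if pvIsTrigger (PySem.Chars.lower (PySem.Chars.strip line)) then body.length
      else body.length + 1 := by
  induction body with
  | nil => simp [pvCutIdx]
  | cons l rest ih =>
    simp only [List.cons_append, pvCutIdx, List.length_cons]
    by_cases h : pvIsTrigger (PySem.Chars.lower (PySem.Chars.strip l)) = true
    · simp [h]
    · have := pvCutIdx_le rest
      simp only [h, ih]
      split_ifs <;> omega

theorem pvJoinNL_eq_nil_iff (body : List (List Char)) : pvJoinNL body = [] ↔ body = [] := by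
  cases body <;> simp [pvJoinNL]

theorem pvJoinNL_append_singleton (body : List (List Char)) (line : List Char) :
    pvJoinNL (body ++ [line]) = pvJoinNL body ++ line ++ ['\n'] := by
  simp [pvJoinNL]

-- the single-segment flush of A equals B's processing of that segment
theorem pvFlush_eq (bs : List (List (String × String))) (n : List Char) (acc : List (List Char)) :
    (if pvJoinNL (acc.take (pvCutIdx acc)) = [] then bs
     else bs ++ [pvMkBranch n (pvJoinNL (acc.take (pvCutIdx acc))) (pvJoinNL (acc.drop (pvCutIdx acc)))]) =
    bs ++ (pvProcSeg (n, acc)).toList := by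
  have hle := pvCutIdx_le acc
  by_cases h : pvCutIdx acc = 0
  · simp [h, pvJoinNL_eq_nil_iff, pvProcSeg]
  · have hne : acc.take (pvCutIdx acc) ≠ [] := by
      cases acc with
      | nil => simp [pvCutIdx] at h
      | cons a t => cases hc : pvCutIdx (a :: t) with
        | zero => exact absurd hc h
        | succ m => simp
    rw [if_neg (by simpa [pvJoinNL_eq_nil_iff] using hne)]
    simp [pvProcSeg, Nat.pos_of_ne_zero h]

-- main invariant: A's loop from mid-segment state (acc = lines of the current segment
-- consumed so far) equals bs ++ B's branches of the remaining segments
theorem pvLoop_eq (lines : List (List Char)) :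
    ∀ (bs : List (List (String × String))) (n : List Char) (acc : List (List Char)),
    pvLoopA lines bs n (pvJoinNL (acc.take (pvCutIdx acc))) (pvJoinNL (acc.drop (pvCutIdx acc)))
        (decide (pvCutIdx acc < acc.length)) =
      bs ++ (pvSegB lines n acc).filterMap pvProcSeg := by
  induction lines with
  | nil =>
    intro bs n acc
    simp only [pvLoopA, pvSegB, List.filterMap]
    rw [pvFlush_eq]
    cases pvProcSeg (n, acc) <;> simp
  | cons line rest ih =>
    intro bs n acc
    have hle := pvCutIdx_le acc
    simp only [pvLoopA, pvSegB]
    by_cases hh : pvIsHeader (PySem.Chars.lower (PySem.Chars.strip line)) = true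
    · simp only [hh, if_true]
      have h2 := ih (bs ++ (pvProcSeg (n, acc)).toList)
        (PySem.Chars.lower (PySem.Chars.strip line)) []
      simp only [pvCutIdx, List.take_nil, List.drop_nil, List.length_nil, pvJoinNL,
        List.map_nil, List.flatten_nil, Nat.lt_irrefl, decide_false] at h2
      rw [pvFlush_eq bs n acc, h2, List.filterMap_cons]
      cases pvProcSeg (n, acc) <;> simp
    · simp only [hh, Bool.false_eq_true, if_false]
      have key := ih bs n (acc ++ [line])
      rw [pvCutIdx_append_singleton] at key
      by_cases hin : pvCutIdx acc < acc.length
      · -- in_final is already true for the current segment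
        have hd : decide (pvCutIdx acc < acc.length) = true := by simpa using hin
        rw [if_pos hin, List.take_append_of_le_length hin.le,
            List.drop_append_of_le_length hin.le, pvJoinNL_append_singleton,
            show decide (pvCutIdx acc < (acc ++ [line]).length) = true by
              simp only [List.length_append, List.length_cons, List.length_nil,
                decide_eq_true_eq]; omega] at key
        simp only [hd]
        by_cases ht : pvIsTrigger (PySem.Chars.lower (PySem.Chars.strip line)) = true <;>
          simp only [ht, Bool.false_eq_true, if_true, if_false] <;> exact key
      · -- in_final is still false: no trigger line in acc yet
        have heq : pvCutIdx acc = acc.length := le_antisymm hle (not_lt.mp hin)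
        have hd : decide (pvCutIdx acc < acc.length) = false := by simpa using hin
        rw [if_neg hin] at key
        simp only [hd]
        rw [heq, List.take_length, List.drop_length]
        simp only [pvJoinNL, List.map_nil, List.flatten_nil]
        by_cases ht : pvIsTrigger (PySem.Chars.lower (PySem.Chars.strip line)) = true
        · -- this line becomes the first `final` line of the segment
          rw [if_pos ht] at key
          rw [List.take_left, List.drop_left,
            show decide (acc.length < (acc ++ [line]).length) = true by
              simp only [List.length_append, List.length_cons, List.length_nil,
                decide_eq_true_eq]; omega] at key
          simp only [ht, if_true, pvJoinNL, List.map_cons, List.map_nil,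
            List.flatten_cons, List.flatten_nil, List.append_nil] at key ⊢
          simpa using key
        · -- still accumulating reasoning
          rw [if_neg ht] at key
          rw [List.take_of_length_le (by simp), List.drop_eq_nil_of_le (by simp),
            pvJoinNL_append_singleton,
            show decide (acc.length + 1 < (acc ++ [line]).length) = false by
              simp only [List.length_append, List.length_cons, List.length_nil,
                decide_eq_false_iff_not]; omega] at key
          simp only [ht, Bool.false_eq_true, if_false, pvJoinNL, List.map_nil,
            List.flatten_nil] at key ⊢
          exact key

-- ===== VERDICT (by name: the statement is the Claim_ definition above) =====
theorem parse_branches_py_spec : Claim_equal_parse_branches_py := by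
  intro response _
  unfold Spec_parse_branches_py parse_branches_py parse_branches_py_alt
  have h := pvLoop_eq (PySem.Chars.splitOn response.toList "\n".toList) [] "Initial".toList []
  simp only [pvCutIdx, List.take_nil, List.drop_nil, List.length_nil, pvJoinNL, List.map_nil,
    List.flatten_nil, Nat.lt_irrefl, decide_false, List.nil_append] at h
  simp only [h]
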